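-- pv_equiv track=rewrite | github.com/arksu/origin_go | tools/image-pixel-processor/frame_split.py | _segments_from_peak_centers
-- ===== SOURCE A (Python) =====
-- def _segments_from_peak_centers(peaks: list[int], profile_length: int) -> list[tuple[int, int]]:
--     if not peaks:
--         return []
--     if len(peaks) == 1:
--         return [(0, profile_length - 1)]
--
--     separators: list[int] = []
--     for left, right in zip(peaks, peaks[1:]):
--         separators.append((left + right) // 2)
--
--     segments: list[tuple[int, int]] = []
--     start = 0
--     for separator in separators:
--         end = separator
--         if end >= start:
--             segments.append((start, end))
--         start = separator + 1
--     if start <= profile_length - 1: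
--         segments.append((start, profile_length - 1))
--     return segments
-- ===== SOURCE B (Python) =====
-- def _segments_from_peak_centers(peaks: list[int], profile_length: int) -> list[tuple[int, int]]:
--     n = len(peaks)
--     if n == 0:
--         return []
--     if n == 1:
--         return [(0, profile_length - 1)]
--     segments: list[tuple[int, int]] = []
--     for i in range(n):
--         left = 0 if i == 0 else (peaks[i - 1] + peaks[i]) // 2 + 1
--         right = profile_length - 1 if i == n - 1 else (peaks[i] + peaks[i + 1]) // 2
--         if left <= right:
--             segments.append((left, right))
--     return segments
-- ===== Notes on version B (the rewrite author's own statement) =====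
-- stated objective: alternative
-- what changed: Replaced A's two-phase scan (build a separators list, then walk it with a mutable start accumulator plus a trailing append) by a single indexed pass that, for each peak, recomputes the neighbouring midpoints to get (left, right) and keeps the pair under one left <= right guard.
import Mathlib
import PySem

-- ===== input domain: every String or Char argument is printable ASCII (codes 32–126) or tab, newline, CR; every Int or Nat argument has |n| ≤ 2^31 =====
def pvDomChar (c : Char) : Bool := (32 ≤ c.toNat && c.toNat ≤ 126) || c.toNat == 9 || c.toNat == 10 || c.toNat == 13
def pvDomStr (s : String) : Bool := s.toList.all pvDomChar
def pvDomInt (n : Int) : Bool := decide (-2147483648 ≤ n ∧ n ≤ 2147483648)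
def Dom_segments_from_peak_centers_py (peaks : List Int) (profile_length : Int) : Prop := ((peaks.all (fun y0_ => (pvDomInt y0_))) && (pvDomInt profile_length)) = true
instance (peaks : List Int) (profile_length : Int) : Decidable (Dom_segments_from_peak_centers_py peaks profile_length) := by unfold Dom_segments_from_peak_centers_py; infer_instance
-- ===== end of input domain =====

-- B replaces A's two-phase separators-then-segments scan with a single indexed pass that
-- recomputes each peak's neighbouring midpoints and filters with one guard (objective: alternative).

-- ===== PORT A =====
-- separators: for left, right in zip(peaks, peaks[1:]): separators.append((left + right) // 2)
def pvSepA (peaks : List Int) : List Int :=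
  (peaks.zip peaks.tail).foldl (fun acc pr => acc ++ [PySem.Int.floordiv (pr.1 + pr.2) 2]) []

def segments_from_peak_centers_py (peaks : List Int) (profile_length : Int) : List (Int × Int) :=
  if peaks = [] then []
  else if peaks.length = 1 then [(0, profile_length - 1)]
  else
    let separators := pvSepA peaks
    -- loop state: (segments, start)
    let p := separators.foldl
      (fun (st : List (Int × Int) × Int) separator =>
        let st1 := if separator ≥ st.2 then st.1 ++ [(st.2, separator)] else st.1
        (st1, separator + 1)) ([], 0)
    if p.2 ≤ profile_length - 1 then p.1 ++ [(p.2, profile_length - 1)] else p.1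

-- ===== PORT B =====
-- indices i of range(n) are always in bounds, so peaks[i-1]/peaks[i]/peaks[i+1] are ported with getD
def segments_from_peak_centers_py_alt (peaks : List Int) (profile_length : Int) : List (Int × Int) :=
  if peaks.length = 0 then []
  else if peaks.length = 1 then [(0, profile_length - 1)]
  else
    (List.range peaks.length).filterMap (fun i =>
      let left : Int := if i = 0 then 0
        else PySem.Int.floordiv (peaks.getD (i - 1) 0 + peaks.getD i 0) 2 + 1
      let right : Int := if i = peaks.length - 1 then profile_length - 1
        else PySem.Int.floordiv (peaks.getD i 0 + peaks.getD (i + 1) 0) 2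
      if left ≤ right then some (left, right) else none)

-- ===== PRECONDITION & SPEC =====
def Spec_segments_from_peak_centers_py (peaks : List Int) (profile_length : Int) (out : List (Int × Int)) : Prop := out = segments_from_peak_centers_py_alt peaks profile_length
instance (peaks : List Int) (profile_length : Int) (out : List (Int × Int)) : Decidable (Spec_segments_from_peak_centers_py peaks profile_length out) := by unfold Spec_segments_from_peak_centers_py; infer_instance

-- ===== CLAIM (what is proved, stated in full; the proofs are below) =====
def Claim_equal_segments_from_peak_centers_py : Prop := ∀ (peaks : List Int) (profile_length : Int), Dom_segments_from_peak_centers_py peaks profile_length → Spec_segments_from_peak_centers_py peaks profile_length (segments_from_peak_centers_py peaks profile_length)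

-- ===== LEMMAS AND PROOFS =====

-- midpoints of consecutive peaks
def pvMids : List Int → List Int
  | [] => []
  | [_] => []
  | a :: b :: t => PySem.Int.floordiv (a + b) 2 :: pvMids (b :: t)

-- common recursive form: emit segments from `start` through the separator list, then the tail piece
def pvCore (L : Int) (start : Int) : List Int → List (Int × Int)
  | [] => if start ≤ L - 1 then [(start, L - 1)] else []
  | e :: t => (if start ≤ e then [(start, e)] else []) ++ pvCore L (e + 1) t

-- B's loop body, with the left bound of index 0 generalised to a parameter `start`
def pvB (peaks : List Int) (L start : Int) (i : Nat) : Option (Int × Int) :=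
  let left : Int := if i = 0 then start
    else PySem.Int.floordiv (peaks.getD (i - 1) 0 + peaks.getD i 0) 2 + 1
  let right : Int := if i = peaks.length - 1 then L - 1
    else PySem.Int.floordiv (peaks.getD i 0 + peaks.getD (i + 1) 0) 2
  if left ≤ right then some (left, right) else none

def pvAltF (L start : Int) (peaks : List Int) : List (Int × Int) :=
  (List.range peaks.length).filterMap (pvB peaks L start)

theorem pvSepA_eq_mids (peaks : List Int) : pvSepA peaks = pvMids peaks := by
  have h : ∀ (l : List (Int × Int)) (init : List Int),
      l.foldl (fun acc pr => acc ++ [PySem.Int.floordiv (pr.1 + pr.2) 2]) init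
        = init ++ l.map (fun pr => PySem.Int.floordiv (pr.1 + pr.2) 2) := by
    intro l
    induction l with
    | nil => intro init; simp [List.foldl]
    | cons x xs ih => intro init; rw [List.foldl_cons, ih]; simp
  unfold pvSepA
  rw [h]
  induction peaks with
  | nil => simp [pvMids]
  | cons a t ih =>
    cases t with
    | nil => simp [pvMids]
    | cons b t' =>
      simp only [List.tail, List.zip_cons_cons, List.map_cons, pvMids, List.nil_append]
      have := ih
      simp only [List.tail, List.nil_append] at this
      rw [this]

theorem pvFoldA_eq_core (L : Int) (s : List Int) :
    ∀ (segs : List (Int × Int)) (start : Int),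
      (let p := s.foldl
        (fun (st : List (Int × Int) × Int) separator =>
          let st1 := if separator ≥ st.2 then st.1 ++ [(st.2, separator)] else st.1
          (st1, separator + 1)) (segs, start)
       if p.2 ≤ L - 1 then p.1 ++ [(p.2, L - 1)] else p.1)
      = segs ++ pvCore L start s := by
  induction s with
  | nil =>
    intro segs start
    simp only [List.foldl_nil, pvCore]
    split <;> simp
  | cons e t ih =>
    intro segs start
    simp only [List.foldl_cons]
    by_cases h : start ≤ e
    · have hge : e ≥ start := h
      simp only [if_pos hge]
      rw [ih]
      simp [pvCore, h, List.append_assoc]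
    · have hge : ¬ e ≥ start := h
      simp only [if_neg hge]
      rw [ih]
      simp [pvCore, h]

theorem pvFilterMap_range_succ {α : Type} (f : Nat → Option α) (n : Nat) :
    (List.range (n + 1)).filterMap f
      = (f 0).toList ++ (List.range n).filterMap (fun j => f (j + 1)) := by
  rw [List.range_succ_eq_map, List.filterMap_cons, List.filterMap_map]
  cases h : f 0 <;> simp

theorem pvB_succ (a b : Int) (t : List Int) (L start : Int) (j : Nat) :
    pvB (a :: b :: t) L start (j + 1)
      = pvB (b :: t) L (PySem.Int.floordiv (a + b) 2 + 1) j := by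
  unfold pvB
  cases j with
  | zero => cases t <;> simp
  | succ k =>
    simp only [List.length_cons, Nat.add_sub_cancel, List.getD_cons_succ]
    by_cases hk : k + 1 = t.length
    · have ht : t ≠ [] := by intro h; rw [h] at hk; simp at hk
      simp [hk, ht]
    · have hk' : ¬ (k + 1 + 1 = t.length + 1) := by omega
      simp [hk, hk']

theorem pvB_zero_two (a b : Int) (t : List Int) (L start : Int) :
    pvB (a :: b :: t) L start 0
      = if start ≤ PySem.Int.floordiv (a + b) 2
          then some (start, PySem.Int.floordiv (a + b) 2) else none := by
  simp [pvB]

theorem pvAltF_eq_core (L : Int) (q : List Int) (hq : q ≠ []) :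
    ∀ start : Int, pvAltF L start q = pvCore L start (pvMids q) := by
  induction q with
  | nil => exact absurd rfl hq
  | cons a t ih =>
    intro start
    cases t with
    | nil =>
      unfold pvAltF
      simp only [List.length_cons, List.length_nil, Nat.zero_add]
      rw [pvFilterMap_range_succ]
      simp only [List.range_zero, List.filterMap_nil, List.append_nil, pvMids, pvCore]
      simp [pvB]
      split <;> simp
    | cons b t' =>
      unfold pvAltF
      simp only [List.length_cons]
      rw [pvFilterMap_range_succ]
      have hshift : (fun j => pvB (a :: b :: t') L start (j + 1))
          = pvB (b :: t') L (PySem.Int.floordiv (a + b) 2 + 1) := by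
        funext j; exact pvB_succ a b t' L start j
      rw [hshift, pvB_zero_two]
      have := ih (by simp) (PySem.Int.floordiv (a + b) 2 + 1)
      unfold pvAltF at this
      simp only [List.length_cons] at this ⊢
      rw [this]
      simp only [pvMids, pvCore]
      split <;> simp

theorem segments_from_peak_centers_py_eq (peaks : List Int) (L : Int) :
    segments_from_peak_centers_py peaks L = segments_from_peak_centers_py_alt peaks L := by
  unfold segments_from_peak_centers_py segments_from_peak_centers_py_alt
  cases peaks with
  | nil => simp
  | cons a t =>
    cases t with
    | nil => simp
    | cons b t' =>
      have hne : ¬ (a :: b :: t' : List Int) = [] := by simp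
      have hl0 : ¬ (a :: b :: t').length = 0 := by simp
      have hl1 : ¬ (a :: b :: t').length = 1 := by simp
      simp only [if_neg hne, if_neg hl0, if_neg hl1]
      rw [pvSepA_eq_mids]
      rw [pvFoldA_eq_core L (pvMids (a :: b :: t')) [] 0]
      have hB : ((List.range (a :: b :: t').length).filterMap (fun i =>
          let left : Int := if i = 0 then 0
            else PySem.Int.floordiv ((a :: b :: t').getD (i - 1) 0 + (a :: b :: t').getD i 0) 2 + 1
          let right : Int := if i = (a :: b :: t').length - 1 then L - 1
            else PySem.Int.floordiv ((a :: b :: t').getD i 0 + (a :: b :: t').getD (i + 1) 0) 2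
          if left ≤ right then some (left, right) else none))
          = pvAltF L 0 (a :: b :: t') := rfl
      rw [hB, pvAltF_eq_core L (a :: b :: t') (by simp)]
      simp

-- ===== VERDICT (by name: the statement is the Claim_ definition above) =====
theorem segments_from_peak_centers_py_spec : Claim_equal_segments_from_peak_centers_py := by
  intro peaks L _
  exact segments_from_peak_centers_py_eq peaks L
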